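-- pv_equiv track=rewrite | github.com/yuters777/stock-data-mining | backtest_output/ant6/module8_data_prep.py | next_trading_day
-- ===== SOURCE A (Python) =====
-- def next_trading_day(trading_days, d, offset=1):
--     """Get the trading day offset days after d."""
--     if d not in trading_days:
--         # Find nearest following trading day
--         for td in trading_days:
--             if td > d:
--                 d = td
--                 break
--         else:
--             return None
--         offset -= 1
--     idx = trading_days.index(d)
--     target = idx + offset
--     if 0 <= target < len(trading_days):
--         return trading_days[target]
--     return None
-- ===== SOURCE B (Python) =====
-- def next_trading_day(trading_days, d, offset=1):
--     """Single pass: track the first index > d while scanning for d itself."""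
--     gt = None
--     target = None
--     for i, td in enumerate(trading_days):
--         if td == d:
--             target = i + offset
--             break
--         if gt is None and td > d:
--             gt = i
--     else:
--         if gt is None:
--             return None
--         target = gt + offset - 1
--     if 0 <= target < len(trading_days):
--         return trading_days[target]
--     return None
-- ===== Notes on version B (the rewrite author's own statement) =====
-- stated objective: alternative
-- what changed: Replaces A's up-to-three scans (membership test, first-greater search loop, then .index) by a single pass that tracks the first index whose element exceeds d while searching for d itself, then does one bounds-checked lookup.
import Mathlib
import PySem

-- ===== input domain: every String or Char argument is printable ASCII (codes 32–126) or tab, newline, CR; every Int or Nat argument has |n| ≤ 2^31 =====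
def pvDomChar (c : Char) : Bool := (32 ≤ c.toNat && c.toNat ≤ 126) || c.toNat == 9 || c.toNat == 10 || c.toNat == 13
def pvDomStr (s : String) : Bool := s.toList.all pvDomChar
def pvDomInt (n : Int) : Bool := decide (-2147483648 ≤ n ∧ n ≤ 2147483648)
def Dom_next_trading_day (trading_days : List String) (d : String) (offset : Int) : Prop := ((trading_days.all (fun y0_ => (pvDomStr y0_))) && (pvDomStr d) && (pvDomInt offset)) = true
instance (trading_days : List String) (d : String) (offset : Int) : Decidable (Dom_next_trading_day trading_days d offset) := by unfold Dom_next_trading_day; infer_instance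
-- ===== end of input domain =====

-- B replaces A's three scans (membership test, first-greater loop, .index) by ONE pass
-- tracking the first index > d while searching for d itself (objective: alternative/simpler).

-- ===== PORT A =====
-- A: if d not in the list, take the first element > d (or return None) and decrement
-- offset; then idx = trading_days.index(d'), target = idx + offset, bounds-checked get.
def next_trading_day (trading_days : List String) (d : String) (offset : Int) : Option String :=
  match (if trading_days.contains d then some (d, offset)
         else match trading_days.find? (fun td => decide (d < td)) with
              | some td => some (td, offset - 1)
              | none => none) with
  | none => none
  | some (d', off') =>
    match PySem.List.index? trading_days d' with
    | none => none   -- unreachable: d' ∈ trading_days in both branches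
    | some idx =>
      let target : Int := (idx : Int) + off'
      if 0 ≤ target ∧ target < (trading_days.length : Int) then
        PySem.List.pyGet? trading_days target
      else none

-- ===== PORT B =====
-- Source B's loop: walk once with a running index, remembering the first index whose
-- element > d (`gt`); stop at the first element equal to d.
def altScan (d : String) (offset : Int) : List String → Nat → Option Nat → Option Int
  | [], _, gt => gt.map (fun g => (g : Int) + offset - 1)
  | td :: rest, i, gt =>
    if td = d then some ((i : Int) + offset)
    else altScan d offset rest (i + 1) (if gt.isNone && decide (d < td) then some i else gt)

def next_trading_day_alt (trading_days : List String) (d : String) (offset : Int) : Option String :=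
  match altScan d offset trading_days 0 none with
  | none => none
  | some target =>
    if 0 ≤ target ∧ target < (trading_days.length : Int) then
      PySem.List.pyGet? trading_days target
    else none

-- ===== PRECONDITION & SPEC =====
def Spec_next_trading_day (trading_days : List String) (d : String) (offset : Int) (out : Option String) : Prop := out = next_trading_day_alt trading_days d offset
instance (trading_days : List String) (d : String) (offset : Int) (out : Option String) : Decidable (Spec_next_trading_day trading_days d offset out) := by unfold Spec_next_trading_day; infer_instance

-- ===== CLAIM (what is proved, stated in full; the proofs are below) =====
def Claim_equal_next_trading_day : Prop := ∀ (trading_days : List String) (d : String) (offset : Int), Dom_next_trading_day trading_days d offset → Spec_next_trading_day trading_days d offset (next_trading_day trading_days d offset)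

-- ===== LEMMAS AND PROOFS =====

-- Characterisation of B's single-pass loop by A's building blocks.
theorem altScan_spec (d : String) (offset : Int) :
    ∀ (tds : List String) (i : Nat) (gt : Option Nat),
      altScan d offset tds i gt =
        match PySem.List.index? tds d with
        | some k => some (((i + k : Nat) : Int) + offset)
        | none =>
          match gt with
          | some g => some ((g : Int) + offset - 1)
          | none =>
            match tds.findIdx? (fun td => decide (d < td)) with
            | some j => some (((i + j : Nat) : Int) + offset - 1)
            | none => none := by
  intro tds
  induction tds with
  | nil => intro i gt; cases gt <;> simp [altScan, PySem.List.index?]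
  | cons x rest ih =>
    intro i gt
    by_cases hx : x = d
    · subst hx
      rw [PySem.List.index?_cons_self]
      simp [altScan]
    · rw [altScan, if_neg hx, ih,
         PySem.List.index?_cons_of_ne rest hx,
         List.findIdx?_cons]
      cases hk : PySem.List.index? rest d with
      | some k =>
        simp
        omega
      | none =>
        by_cases hlt : d < x
        · cases gt with
          | some g => simp
          | none => simp [hlt]
        · cases gt with
          | some g => simp
          | none =>
            simp only [hlt, decide_false, Option.isNone_none, Bool.and_true]
            cases hj : rest.findIdx? (fun td => decide (d < td)) with
            | some j => simp [hj]; omega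
            | none => simp [hj]

-- find? hitting an element means findIdx? yields an index.
theorem findIdx?_isSome_of_find? {α : Type} (p : α → Bool) (l : List α) (a : α)
    (h : l.find? p = some a) : ∃ j, l.findIdx? p = some j := by
  induction l with
  | nil => simp [List.find?] at h
  | cons x rest ih =>
    by_cases hp : p x
    · exact ⟨0, by simp [List.findIdx?_cons, hp]⟩
    · simp only [List.find?_cons, hp, if_false] at h
      obtain ⟨j, hj⟩ := ih h
      exact ⟨j + 1, by simp [List.findIdx?_cons, hp, hj]⟩

-- If d is nowhere in the list, the first element > d is also the FIRST occurrence of its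
-- own value, so .index finds exactly the findIdx? position.
theorem index_of_first_gt (d : String) :
    ∀ (tds : List String), ¬ d ∈ tds →
      ∀ td j, tds.find? (fun x => decide (d < x)) = some td →
        tds.findIdx? (fun x => decide (d < x)) = some j →
        PySem.List.index? tds td = some j := by
  intro tds
  induction tds with
  | nil => intro _ td j h; simp [List.find?] at h
  | cons x rest ih =>
    intro hmem td j hfind hidx
    rw [List.findIdx?_cons] at hidx
    by_cases hlt : d < x
    · simp only [List.find?_cons, hlt, decide_true, if_true, Option.some.injEq] at hfind
      simp only [hlt, decide_true, if_true, Option.some.injEq] at hidx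
      subst hfind
      subst hidx
      exact PySem.List.index?_cons_self _ _
    · simp only [List.find?_cons, hlt, decide_false] at hfind
      simp only [hlt, decide_false] at hidx
      obtain ⟨j', hj', rfl⟩ : ∃ j', rest.findIdx? (fun x => decide (d < x)) = some j' ∧ j' + 1 = j := by
        cases hj : rest.findIdx? (fun x => decide (d < x)) with
        | none => rw [hj] at hidx; simp at hidx
        | some j' => rw [hj] at hidx; simp at hidx; exact ⟨j', rfl, hidx⟩
      have hdtd : d < td := by
        have := List.find?_some hfind
        simpa using this
      have hxtd : x ≠ td := fun h => hlt (h ▸ hdtd)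
      rw [PySem.List.index?_cons_of_ne rest hxtd,
          ih (fun h => hmem (List.mem_cons_of_mem x h)) td j' hfind hj']
      rfl

-- ===== VERDICT (by name: the statement is the Claim_ definition above) =====
theorem next_trading_day_spec : Claim_equal_next_trading_day := by
  intro tds d offset _
  unfold Spec_next_trading_day next_trading_day next_trading_day_alt
  rw [altScan_spec]
  by_cases hmem : d ∈ tds
  · have hc : tds.contains d = true := by simp; exact hmem
    rw [if_pos hc]
    cases hk : PySem.List.index? tds d with
    | none => rw [PySem.List.index?_eq_none_iff] at hk; exact absurd hmem hk
    | some k => rw [PySem.List.index?_eq_idxOf?] at hk; simp [hk]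
  · have hc : tds.contains d = false := by simp; exact hmem
    rw [if_neg (by simp; exact hmem)]
    have hknone : PySem.List.index? tds d = none :=
      (PySem.List.index?_eq_none_iff tds d).mpr hmem
    rw [hknone]
    cases hfind : tds.find? (fun x => decide (d < x)) with
    | none =>
      have hjn : tds.findIdx? (fun x => decide (d < x)) = none := by
        rw [List.findIdx?_eq_none_iff]
        intro x hx
        simpa using List.find?_eq_none.mp hfind x hx
      rw [hjn]
    | some td =>
      obtain ⟨j, hj⟩ := findIdx?_isSome_of_find? _ tds td hfind
      have hidx := index_of_first_gt d tds hmem td j hfind hj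
      simp only [hj, hidx, Nat.zero_add]
      have e : (j : Int) + (offset - 1) = (j : Int) + offset - 1 := by ring
      rw [e]
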